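-- pv_equiv track=rewrite | github.com/liucong552-art/chonggou | usr/local/lib/vless-reality/render_table.py | take_prefix
-- ===== SOURCE A (Python) =====
-- import unicodedata
-- from typing import Iterable, List, Sequence
--
-- def char_width(ch: str) -> int:
--     if not ch or ch in "\n\r" or unicodedata.combining(ch):
--         return 0
--     return 2 if unicodedata.east_asian_width(ch) in ("W", "F") else 1
--
-- def take_prefix(text: str, width: int):
--     out: List[str] = []
--     used = 0
--     idx = 0
--     while idx < len(text):
--         ch = text[idx]
--         if ch == "\n":
--             idx += 1
--             break
--         w = char_width(ch)
--         if used + w > width: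
--             break
--         out.append(ch)
--         used += w
--         idx += 1
--     return "".join(out), text[idx:]
-- ===== SOURCE B (Python) =====
-- import unicodedata
-- from typing import List
--
-- def char_width(ch: str) -> int:
--     if not ch or ch in "\n\r" or unicodedata.combining(ch):
--         return 0
--     return 2 if unicodedata.east_asian_width(ch) in ("W", "F") else 1
--
-- def take_prefix(text: str, width: int):
--     nl = text.find("\n")
--     limit = len(text) if nl < 0 else nl
--     # cumulative display-width table of the line before the first newline
--     widths: List[int] = []
--     total = 0
--     for ch in text[:limit]:
--         total += char_width(ch)
--         widths.append(total)
--     # the table is non-decreasing, so the cut point is the number of entries <= width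
--     cut = sum(1 for s in widths if s <= width)
--     if cut < limit:
--         return text[:cut], text[cut:]
--     if nl >= 0:
--         return text[:limit], text[limit + 1:]
--     return text, ""
-- ===== Notes on version B (the rewrite author's own statement) =====
-- stated objective: alternative
-- what changed: Replaced A's single accumulate-and-break character scan that builds the prefix incrementally by: find the first newline, build a cumulative display-width table of that line, count the table entries that fit within width (the cut point of the non-decreasing table), and slice the string at the cut (with the asymmetric newline case handled separately).
import Mathlib
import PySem

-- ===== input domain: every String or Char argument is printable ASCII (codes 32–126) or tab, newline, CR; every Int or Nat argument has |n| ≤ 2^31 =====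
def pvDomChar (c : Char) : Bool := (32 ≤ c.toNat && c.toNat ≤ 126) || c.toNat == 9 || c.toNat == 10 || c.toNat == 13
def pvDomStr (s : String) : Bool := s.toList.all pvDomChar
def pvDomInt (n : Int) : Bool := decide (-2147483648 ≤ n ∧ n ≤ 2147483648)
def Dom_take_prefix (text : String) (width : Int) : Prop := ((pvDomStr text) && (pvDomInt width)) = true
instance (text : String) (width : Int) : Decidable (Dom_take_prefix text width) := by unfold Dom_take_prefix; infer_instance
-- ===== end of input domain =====

-- B replaces A's accumulate-and-break scan by a cumulative-width table plus a count of
-- fitting prefixes and slicing (objective: alternative decomposition, same cost).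

-- ===== PORT A =====
-- char_width, exact on Dom (ASCII 32–126 and tab are width 1, '\n'/'\r' are width 0;
-- no combining or wide characters exist in the domain)
def pvCharWidth (c : Char) : Int := if c = '\n' ∨ c = '\r' then 0 else 1

-- the while loop: out/used accumulate, break at '\n' (skipping it) or when the width overflows
def pvGoA (width used : Int) : List Char → List Char × List Char
  | [] => ([], [])
  | c :: rest =>
    if c = '\n' then ([], rest)
    else
      let w := pvCharWidth c
      if used + w > width then ([], c :: rest)
      else
        let pr := pvGoA width (used + w) rest
        (c :: pr.1, pr.2)

def take_prefix (text : String) (width : Int) : String × String :=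
  let pr := pvGoA width 0 text.toList
  (String.ofList pr.1, String.ofList pr.2)

-- ===== PORT B =====
-- running-total table (the for loop building `widths` in Source B)
def pvAccum (acc : Int) : List Int → List Int
  | [] => []
  | x :: xs => (acc + x) :: pvAccum (acc + x) xs

def pvAltCore (l : List Char) (width used : Int) : List Char × List Char :=
  let nl := List.findIdx? (fun c => c = '\n') l      -- text.find('\n')
  let limit := nl.getD l.length
  let widths := pvAccum used ((l.take limit).map pvCharWidth)
  let cut := widths.countP (fun s => decide (s ≤ width))   -- sum(1 for s in widths if s <= width)
  if cut < limit then (l.take cut, l.drop cut)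
  else if nl.isSome then (l.take limit, l.drop (limit + 1))
  else (l, [])

def take_prefix_alt (text : String) (width : Int) : String × String :=
  let pr := pvAltCore text.toList width 0
  (String.ofList pr.1, String.ofList pr.2)

-- ===== PRECONDITION & SPEC =====
def Spec_take_prefix (text : String) (width : Int) (out : String × String) : Prop := out = take_prefix_alt text width
instance (text : String) (width : Int) (out : String × String) : Decidable (Spec_take_prefix text width out) := by unfold Spec_take_prefix; infer_instance

-- ===== CLAIM (what is proved, stated in full; the proofs are below) =====
def Claim_equal_take_prefix : Prop := ∀ (text : String) (width : Int), Dom_take_prefix text width → Spec_take_prefix text width (take_prefix text width)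
-- ===== LEMMAS AND PROOFS =====
theorem pvCharWidth_nonneg (c : Char) : 0 ≤ pvCharWidth c := by
  unfold pvCharWidth; split <;> omega

theorem pvAccum_ge (l : List Char) (acc : Int) :
    ∀ s ∈ pvAccum acc (l.map pvCharWidth), acc ≤ s := by
  induction l generalizing acc with
  | nil => simp [pvAccum]
  | cons c rest ih =>
    intro s hs
    simp only [List.map, pvAccum, List.mem_cons] at hs
    have hw := pvCharWidth_nonneg c
    rcases hs with h | h
    · omega
    · have := ih (acc + pvCharWidth c) s h; omega

theorem pvCountP_zero (l : List Char) (acc width : Int) (h : width < acc) :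
    (pvAccum acc (l.map pvCharWidth)).countP (fun s => decide (s ≤ width)) = 0 := by
  rw [List.countP_eq_zero]
  intro s hs
  have := pvAccum_ge l acc s hs
  simp only [decide_eq_true_eq]
  omega

theorem pvAccum_length (l : List Char) (acc : Int) :
    (pvAccum acc (l.map pvCharWidth)).length = l.length := by
  induction l generalizing acc with
  | nil => simp [pvAccum]
  | cons c rest ih => simp [pvAccum, ih]
theorem pvAltCore_cons_ov (c : Char) (rest : List Char) (width used : Int)
    (hnl : c ≠ '\n') (hov : width < used + pvCharWidth c) :
    pvAltCore (c :: rest) width used = ([], c :: rest) := by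
  unfold pvAltCore
  have hcb : decide (c = '\n') = false := by simp [hnl]
  have hhd : decide (used + pvCharWidth c ≤ width) = false := by simp; omega
  rw [List.findIdx?_cons]
  simp only [hcb, Bool.false_eq_true, if_false]
  cases h : List.findIdx? (fun x => decide (x = '\n')) rest with
  | none =>
    simp only [Option.map_none, Option.getD_none, Option.isSome_none, List.length_cons,
      List.take_succ_cons, List.take_length, List.map_cons, pvAccum, List.countP_cons,
      pvCountP_zero rest (used + pvCharWidth c) width hov, hhd]
    simp
  | some j =>
    simp only [Option.map_some, Option.getD_some, Option.isSome_some, List.take_succ_cons,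
      List.map_cons, pvAccum, List.countP_cons,
      pvCountP_zero (rest.take j) (used + pvCharWidth c) width hov, hhd]
    simp

theorem pvAltCore_cons (c : Char) (rest : List Char) (width used : Int)
    (hnl : c ≠ '\n') (hfit : used + pvCharWidth c ≤ width) :
    pvAltCore (c :: rest) width used =
      (c :: (pvAltCore rest width (used + pvCharWidth c)).1,
       (pvAltCore rest width (used + pvCharWidth c)).2) := by
  unfold pvAltCore
  have hcb : decide (c = '\n') = false := by simp [hnl]
  have hhd : decide (used + pvCharWidth c ≤ width) = true := by simpa using hfit
  rw [List.findIdx?_cons]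
  simp only [hcb, Bool.false_eq_true, if_false]
  cases h : List.findIdx? (fun x => decide (x = '\n')) rest with
  | none =>
    simp only [Option.map_none, Option.getD_none, Option.isSome_none, List.length_cons,
      List.take_succ_cons, List.take_length, List.map_cons, pvAccum, List.countP_cons, hhd, if_true]
    have hle := (List.countP_le_length (p := fun s => decide (s ≤ width))
      (l := pvAccum (used + pvCharWidth c) (rest.map pvCharWidth))).trans_eq
      (pvAccum_length rest _)
    set cut' := (pvAccum (used + pvCharWidth c) (rest.map pvCharWidth)).countP
        (fun s => decide (s ≤ width)) with hcut'
    by_cases hc : cut' < rest.length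
    · rw [if_pos (by omega), if_pos hc]
      simp [List.drop_succ_cons]
    · rw [if_neg (by omega), if_neg hc]
      simp
  | some j =>
    simp only [Option.map_some, Option.getD_some, Option.isSome_some, List.take_succ_cons,
      List.map_cons, pvAccum, List.countP_cons, hhd, if_true]
    have hle := (List.countP_le_length (p := fun s => decide (s ≤ width))
      (l := pvAccum (used + pvCharWidth c) ((rest.take j).map pvCharWidth))).trans_eq
      (pvAccum_length _ _)
    have hle2 : (rest.take j).length ≤ j := by simp
    set cut' := (pvAccum (used + pvCharWidth c) ((rest.take j).map pvCharWidth)).countP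
        (fun s => decide (s ≤ width)) with hcut'
    by_cases hc : cut' < j
    · rw [if_pos (by omega), if_pos hc]
      simp [List.drop_succ_cons]
    · rw [if_neg (by omega), if_neg hc]
      simp [List.drop_succ_cons]

theorem pvMain (l : List Char) (width : Int) :
    ∀ used, pvGoA width used l = pvAltCore l width used := by
  induction l with
  | nil => intro used; simp [pvGoA, pvAltCore, pvAccum]
  | cons c rest ih =>
    intro used
    by_cases hnl : c = '\n'
    · subst hnl
      simp [pvGoA, pvAltCore, List.findIdx?_cons, pvAccum]
    · by_cases hov : used + pvCharWidth c > width
      · rw [pvAltCore_cons_ov c rest width used hnl hov]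
        simp [pvGoA, hnl, hov]
      · rw [pvAltCore_cons c rest width used hnl (by omega)]
        simp only [pvGoA, if_neg hnl]
        rw [if_neg hov, ih]

-- ===== VERDICT (by name: the statement is the Claim_ definition above) =====
theorem take_prefix_spec : Claim_equal_take_prefix := by
  intro text width _
  unfold Spec_take_prefix take_prefix take_prefix_alt
  rw [pvMain]
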